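-- pv_equiv track=rewrite | github.com/al3ssandrocaruso/master-thesis-eth | utils/datetime/datetime_utils.py | map_hour_to_windows
-- ===== SOURCE A (Python) =====
-- def map_hour_to_windows(hour, interval_length, overlap):
--     windows = []
--     num_windows = 24 // (interval_length - overlap)  # Calculate number of windows needed
--     for i in range(num_windows):
--         start = i * (interval_length - overlap)
--         end = start + interval_length
--         if start <= hour < end or (start <= hour + 24 < end):  # Handle wrap-around for hours
--             windows.append(i + 1)
--     return windows
-- ===== SOURCE B (Python) =====
-- def map_hour_to_windows(hour, interval_length, overlap):
--     # Direct index arithmetic: derive the matching window indices as (at most)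
--     # two integer intervals instead of scanning every window.
--     step = interval_length - overlap
--     num_windows = 24 // step  # raises ZeroDivisionError like the original when step == 0
--     if step < 0:
--         return []
--     lo1 = (hour - interval_length) // step + 1
--     hi1 = hour // step
--     lo2 = (hour + 24 - interval_length) // step + 1
--     hi2 = (hour + 24) // step
--     a1 = max(lo1, 0)
--     b1 = min(hi1, num_windows - 1)
--     a2 = max(lo2, b1 + 1, 0)
--     b2 = min(hi2, num_windows - 1)
--     return [i + 1 for i in range(a1, b1 + 1)] + [i + 1 for i in range(a2, b2 + 1)]
-- ===== Notes on version B (the rewrite author's own statement) =====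
-- stated objective: alternative
-- what changed: Replaces the scan over all num_windows windows with direct floor-division arithmetic that computes the matching window indices as (at most) two integer intervals and emits them as ranges.
import Mathlib
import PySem

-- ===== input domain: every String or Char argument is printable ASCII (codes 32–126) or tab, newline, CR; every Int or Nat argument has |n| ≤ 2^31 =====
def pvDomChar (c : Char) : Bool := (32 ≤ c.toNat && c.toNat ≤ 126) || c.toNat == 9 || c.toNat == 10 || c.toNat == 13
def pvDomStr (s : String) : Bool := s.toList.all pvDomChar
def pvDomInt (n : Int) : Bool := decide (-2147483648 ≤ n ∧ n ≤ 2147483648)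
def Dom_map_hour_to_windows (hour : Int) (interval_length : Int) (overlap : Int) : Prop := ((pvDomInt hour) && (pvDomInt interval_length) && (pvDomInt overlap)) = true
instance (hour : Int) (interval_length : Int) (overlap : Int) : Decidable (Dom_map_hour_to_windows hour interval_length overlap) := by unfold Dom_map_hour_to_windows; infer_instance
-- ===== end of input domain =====

-- B replaces A's scan over all windows by floor-division arithmetic producing the
-- matching indices as at most two integer ranges (objective: alternative algorithm).

-- ===== PORT A =====
def map_hour_to_windows (hour : Int) (interval_length : Int) (overlap : Int) : List Int :=
  let num_windows := PySem.Int.floordiv 24 (interval_length - overlap)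
  (PySem.List.pyRange 0 num_windows 1).foldl
    (fun windows i =>
      let start := i * (interval_length - overlap)
      let «end» := start + interval_length
      if (start ≤ hour ∧ hour < «end») ∨ (start ≤ hour + 24 ∧ hour + 24 < «end»)
      then windows ++ [i + 1] else windows) []

-- ===== PORT B =====
def map_hour_to_windows_alt (hour : Int) (interval_length : Int) (overlap : Int) : List Int :=
  let step := interval_length - overlap
  let num_windows := PySem.Int.floordiv 24 step
  if step < 0 then []
  else
    let lo1 := PySem.Int.floordiv (hour - interval_length) step + 1
    let hi1 := PySem.Int.floordiv hour step
    let lo2 := PySem.Int.floordiv (hour + 24 - interval_length) step + 1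
    let hi2 := PySem.Int.floordiv (hour + 24) step
    let a1 := max lo1 0
    let b1 := min hi1 (num_windows - 1)
    let a2 := max lo2 (max (b1 + 1) 0)
    let b2 := min hi2 (num_windows - 1)
    (PySem.List.pyRange a1 (b1 + 1) 1).map (· + 1) ++ (PySem.List.pyRange a2 (b2 + 1) 1).map (· + 1)

-- ===== PRECONDITION & SPEC =====
-- Pre_ excludes exactly the inputs where A raises ZeroDivisionError (interval_length == overlap); B raises there too.
def Pre_map_hour_to_windows (hour : Int) (interval_length : Int) (overlap : Int) : Prop :=
  interval_length - overlap ≠ 0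
instance (hour : Int) (interval_length : Int) (overlap : Int) : Decidable (Pre_map_hour_to_windows hour interval_length overlap) := by unfold Pre_map_hour_to_windows; infer_instance

def pvWitness_map_hour_to_windows : Int × Int × Int := (5, 4, 2)

def Spec_map_hour_to_windows (hour : Int) (interval_length : Int) (overlap : Int) (out : List Int) : Prop := out = map_hour_to_windows_alt hour interval_length overlap
instance (hour : Int) (interval_length : Int) (overlap : Int) (out : List Int) : Decidable (Spec_map_hour_to_windows hour interval_length overlap out) := by unfold Spec_map_hour_to_windows; infer_instance

-- ===== CLAIM (what is proved, stated in full; the proofs are below) =====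
def Claim_equal_map_hour_to_windows : Prop := ∀ (hour : Int) (interval_length : Int) (overlap : Int), Dom_map_hour_to_windows hour interval_length overlap → Pre_map_hour_to_windows hour interval_length overlap → Spec_map_hour_to_windows hour interval_length overlap (map_hour_to_windows hour interval_length overlap)

-- ===== LEMMAS AND PROOFS =====

-- two integer ranges with the same endpoints, or both empty, are the same list
lemma pyRange_one_congr (x y x' y' : Int)
    (h : (x = x' ∧ y = y') ∨ (y ≤ x ∧ y' ≤ x')) :
    PySem.List.pyRange x y 1 = PySem.List.pyRange x' y' 1 := by
  rcases h with ⟨h1, h2⟩ | ⟨h1, h2⟩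
  · rw [h1, h2]
  · rw [PySem.List.pyRange_one_eq_nil h1, PySem.List.pyRange_one_eq_nil h2]

-- filtering a range by an interval condition yields a range
lemma filter_pyRange_interval (lo hi a b : Int) :
    (PySem.List.pyRange a b 1).filter (fun i => decide (lo ≤ i ∧ i < hi)) =
      PySem.List.pyRange (max a lo) (min b hi) 1 := by
  by_cases hab : b ≤ a
  · rw [PySem.List.pyRange_one_eq_nil hab,
       PySem.List.pyRange_one_eq_nil (by omega : min b hi ≤ max a lo)]
    rfl
  · push_neg at hab
    rw [PySem.List.pyRange_one_cons hab]
    have ih := filter_pyRange_interval lo hi (a + 1) b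
    simp only [List.filter_cons, decide_eq_true_eq]
    by_cases hp : lo ≤ a ∧ a < hi
    · rw [if_pos hp, ih,
         show max (a + 1) lo = a + 1 by omega,
         show max a lo = a by omega,
         PySem.List.pyRange_one_cons (show a < min b hi by omega)]
    · rw [if_neg hp, ih]
      exact pyRange_one_congr _ _ _ _ (by omega)
  termination_by (b - a).toNat
  decreasing_by omega

-- the window condition is an interval of indices, by the floor-division bracket lemmas
lemma cond_iff_interval (v step il i : Int) (hstep : 0 < step) :
    (i * step ≤ v ∧ v < i * step + il) ↔
      (PySem.Int.floordiv (v - il) step + 1 ≤ i ∧ i < PySem.Int.floordiv v step + 1) := by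
  have e1 : i ≤ PySem.Int.floordiv v step ↔ i * step ≤ v :=
    PySem.Int.le_floordiv_iff_mul_le hstep
  have e2 : PySem.Int.floordiv (v - il) step < i ↔ v - il < i * step :=
    PySem.Int.floordiv_lt_iff_lt_mul hstep
  constructor
  · rintro ⟨u, w⟩
    have := e2.mpr (by linarith)
    have := e1.mpr u
    omega
  · rintro ⟨u, w⟩
    have := e2.mp (by omega)
    have := e1.mp (by omega)
    constructor <;> linarith

lemma map_hour_to_windows_eq_alt (hour interval_length overlap : Int)
    (hpre : interval_length - overlap ≠ 0) :
    map_hour_to_windows hour interval_length overlap =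
      map_hour_to_windows_alt hour interval_length overlap := by
  set step := interval_length - overlap with hstepdef
  rcases lt_or_gt_of_ne hpre with hneg | hpos
  · -- negative step: num_windows < 0, both sides are []
    have hdm := PySem.Int.floordiv_mul_add_mod 24 step
    have hmb := PySem.Int.mod_neg_bounds 24 hneg
    have hn : PySem.Int.floordiv 24 step ≤ 0 := by nlinarith [PySem.Int.floordiv_mul_add_mod 24 step]
    simp only [map_hour_to_windows, map_hour_to_windows_alt, ← hstepdef]
    rw [if_pos hneg, PySem.List.pyRange_one_eq_nil hn]
    rfl
  · -- positive step
    have hn0 : 0 ≤ PySem.Int.floordiv 24 step :=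
      (PySem.Int.le_floordiv_iff_mul_le hpos).mpr (by omega)
    set n := PySem.Int.floordiv 24 step with hn
    set lo1 := PySem.Int.floordiv (hour - interval_length) step + 1 with hlo1
    set hi1 := PySem.Int.floordiv hour step with hhi1
    set lo2 := PySem.Int.floordiv (hour + 24 - interval_length) step + 1 with hlo2
    set hi2 := PySem.Int.floordiv (hour + 24) step with hhi2
    have hmono1 : lo1 ≤ lo2 := by
      have := Int.ediv_le_ediv hpos (show hour - interval_length ≤ hour + 24 - interval_length by omega)
      rw [hlo1, hlo2, PySem.Int.floordiv_eq_ediv_of_pos hpos, PySem.Int.floordiv_eq_ediv_of_pos hpos]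
      omega
    have hmono2 : hi1 ≤ hi2 := by
      have := Int.ediv_le_ediv hpos (show hour ≤ hour + 24 by omega)
      rw [hhi1, hhi2, PySem.Int.floordiv_eq_ediv_of_pos hpos, PySem.Int.floordiv_eq_ediv_of_pos hpos]
      exact this
    have h1 := fun i => cond_iff_interval hour step interval_length i hpos
    have h2 := fun i => cond_iff_interval (hour + 24) step interval_length i hpos
    simp only [map_hour_to_windows, map_hour_to_windows_alt, ← hstepdef, ← hn,
      ← hlo1, ← hhi1, ← hlo2, ← hhi2]
    rw [if_neg (by omega)]
    rw [PySem.List.foldl_append_ite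
      (fun i => (i * step ≤ hour ∧ hour < i * step + interval_length) ∨
        (i * step ≤ hour + 24 ∧ hour + 24 < i * step + interval_length))
      (fun i => i + 1)]
    simp only [List.nil_append]
    set c := max 0 (min n (hi1 + 1)) with hc
    rw [PySem.List.pyRange_one_append 0 c n (by omega) (by omega), List.filter_append,
      List.map_append]
    congr 1
    · -- first chunk: only the hour-interval matters below c
      rw [List.filter_congr (fun x hx => ?_), filter_pyRange_interval lo1 (hi1 + 1) 0 c]
      · exact congrArg _ (pyRange_one_congr _ _ _ _ (by omega))
      · have hxm : 0 ≤ x ∧ x < c := PySem.List.mem_pyRange_one.mp hx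
        simp only [decide_eq_decide]
        rw [h1 x, h2 x]
        constructor
        · rintro (h | h)
          · exact h
          · rw [← hlo2, ← hhi2] at h; omega
        · exact Or.inl
    · -- second chunk: only the (hour+24)-interval matters from c on
      rw [List.filter_congr (fun x hx => ?_), filter_pyRange_interval lo2 (hi2 + 1) c n]
      · exact congrArg _ (pyRange_one_congr _ _ _ _ (by omega))
      · have hxm : c ≤ x ∧ x < n := PySem.List.mem_pyRange_one.mp hx
        simp only [decide_eq_decide]
        rw [h1 x, h2 x]
        constructor
        · rintro (h | h)
          · omega
          · exact h
        · exact Or.inr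

-- ===== VERDICT (by name: the statement is the Claim_ definition above) =====
theorem map_hour_to_windows_spec : Claim_equal_map_hour_to_windows := by
  intro hour interval_length overlap _ hpre
  unfold Spec_map_hour_to_windows
  exact map_hour_to_windows_eq_alt hour interval_length overlap hpre
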